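-- pv_equiv track=rewrite | github.com/rajneeshkumar146/AlmaBetter | lecture_010/file.py | boardPath
-- ===== SOURCE A (Python) =====
-- def boardPath(sp, ep):
--     if sp == ep:
--         return [""]
--
--     myAns = []
--     dice = 1
--     while dice <= 6 and sp + dice <= ep:
--         smallAns = boardPath(sp + dice, ep)
--         for s in smallAns:
--             myAns.append(str(dice) + s)
--         dice += 1
--
--     return myAns
-- ===== SOURCE B (Python) =====
-- def boardPath(sp, ep):
--     if sp > ep:
--         return []
--     # dp[k] = all dice-path strings covering exactly distance k
--     dp = [[""]]
--     for k in range(1, ep - sp + 1):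
--         dp.append([str(d) + s for d in range(1, min(6, k) + 1) for s in dp[k - d]])
--     return dp[ep - sp]
-- ===== Notes on version B (the rewrite author's own statement) =====
-- stated objective: alternative
-- what changed: Replaces A's top-down recursion (re-deriving each position's path list once per caller) with a bottom-up dynamic program over a list dp indexed by distance to ep, where dp[k] holds all path strings covering distance k, built in one loop and returned at dp[ep-sp]; Pre_ excludes only boards deeper than CPython's recursion limit, on which A raises RecursionError.
import Mathlib
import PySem

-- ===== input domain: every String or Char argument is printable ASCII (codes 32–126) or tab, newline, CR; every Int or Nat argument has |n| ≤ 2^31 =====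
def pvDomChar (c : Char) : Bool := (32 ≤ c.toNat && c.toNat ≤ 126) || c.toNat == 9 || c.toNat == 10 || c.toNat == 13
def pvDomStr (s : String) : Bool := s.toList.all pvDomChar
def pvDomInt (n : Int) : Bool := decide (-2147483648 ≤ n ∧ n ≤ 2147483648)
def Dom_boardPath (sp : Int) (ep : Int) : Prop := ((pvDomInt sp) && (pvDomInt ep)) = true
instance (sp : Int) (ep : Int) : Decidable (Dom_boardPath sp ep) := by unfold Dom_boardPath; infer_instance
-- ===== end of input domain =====

-- B replaces A's exponential-duplication recursion by a bottom-up list DP indexed by distance to ep (alternative decomposition; same asymptotic output cost).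

-- ===== PORT A =====
-- A's while loop: dice runs 1,2,...; we carry d : Nat with dice = d + 1 (so the loop
-- counter provably stays ≥ 1); the guard is exactly Python's 'dice <= 6 and sp+dice <= ep'.
mutual
def boardPath (sp : Int) (ep : Int) : List String :=
  if sp = ep then [""]
  else boardPathWhile sp ep 0
termination_by ((ep - sp).toNat, 7)
decreasing_by exact Prod.Lex.right _ (by omega)

def boardPathWhile (sp : Int) (ep : Int) (d : Nat) : List String :=
  if (d : Int) + 1 ≤ 6 ∧ sp + ((d : Int) + 1) ≤ ep then
    ((boardPath (sp + ((d : Int) + 1)) ep).map (fun s => PySem.Int.toStr ((d : Int) + 1) ++ s))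
      ++ boardPathWhile sp ep (d + 1)
  else []
termination_by ((ep - sp).toNat, 6 - d)
decreasing_by
  · apply Prod.Lex.left; omega
  · exact Prod.Lex.right _ (by omega)
end

-- ===== PORT B =====
-- dp[k] = all dice-path strings covering exactly distance k; dp[k-d] is always in
-- range in Python, so the total pyGetD default [] is never used.
def boardPath_alt (sp : Int) (ep : Int) : List String :=
  if ep < sp then []
  else
    let dp := (PySem.List.pyRange 1 (ep - sp + 1) 1).foldl
      (fun dp k =>
        dp ++ [(PySem.List.pyRange 1 (min 6 k + 1) 1).flatMap
          (fun d => (PySem.List.pyGetD dp (k - d) []).map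
            (fun s => PySem.Int.toStr d ++ s))])
      [[""]]
    PySem.List.pyGetD dp (ep - sp) []

-- ===== PRECONDITION & SPEC =====
-- Pre_ excludes only boards so deep that the Python A exceeds CPython's recursion
-- limit (depth ep - sp) and raises RecursionError; nothing else is excluded.
def Pre_boardPath (sp : Int) (ep : Int) : Prop := ep - sp ≤ 900
instance (sp : Int) (ep : Int) : Decidable (Pre_boardPath sp ep) := by unfold Pre_boardPath; infer_instance
def pvWitness_boardPath : Int × Int := (0, 4)

def Spec_boardPath (sp : Int) (ep : Int) (out : List String) : Prop := out = boardPath_alt sp ep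
instance (sp : Int) (ep : Int) (out : List String) : Decidable (Spec_boardPath sp ep out) := by unfold Spec_boardPath; infer_instance

-- ===== CLAIM (what is proved, stated in full; the proofs are below) =====
def Claim_equal_boardPath : Prop := ∀ (sp : Int) (ep : Int), Dom_boardPath sp ep → Pre_boardPath sp ep → Spec_boardPath sp ep (boardPath sp ep)

-- ===== LEMMAS AND PROOFS =====

-- G n = the common value: all paths covering distance n ≥ 0.
def G : Nat → List String
  | 0 => [""]
  | n + 1 => (List.range (min 6 (n + 1))).flatMap
      (fun i => (G (n - i)).map (fun s => PySem.Int.toStr ((i : Int) + 1) ++ s))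

-- A's recursion computes G of the distance.
theorem A_eq_G (n : Nat) : ∀ sp ep : Int, ep - sp = (n : Int) → boardPath sp ep = G n := by
  induction n using Nat.strong_induction_on with
  | _ n IH =>
    intro sp ep h
    match n with
    | 0 =>
      have hsp : sp = ep := by omega
      rw [boardPath, if_pos hsp]; simp [G]
    | Nat.succ m =>
      have hne : sp ≠ ep := by intro he; rw [he] at h; omega
      rw [boardPath, if_neg hne]
      have key : ∀ k d, 6 - d = k → boardPathWhile sp ep d =
          (List.range' d (min 6 (m + 1) - d)).flatMap
            (fun i => (G (m + 1 - (i + 1))).map (fun s => PySem.Int.toStr ((i : Int) + 1) ++ s)) := by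
        intro k
        induction k with
        | zero =>
          intro d hd
          rw [boardPathWhile]
          have hng : ¬ ((d : Int) + 1 ≤ 6 ∧ sp + ((d : Int) + 1) ≤ ep) := by
            intro ⟨h1, _⟩; omega
          rw [if_neg hng]
          have : min 6 (m + 1) - d = 0 := by omega
          simp [this]
        | succ k ih =>
          intro d hd
          rw [boardPathWhile]
          by_cases hle : sp + ((d : Int) + 1) ≤ ep
          · have hcond : (d : Int) + 1 ≤ 6 ∧ sp + ((d : Int) + 1) ≤ ep := ⟨by omega, hle⟩
            rw [if_pos hcond]
            have hdm : d + 1 ≤ m + 1 := by omega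
            have hrec : boardPath (sp + ((d : Int) + 1)) ep = G (m + 1 - (d + 1)) := by
              apply IH (m + 1 - (d + 1)) (by omega)
              push_cast; omega
            rw [hrec, ih (d + 1) (by omega)]
            have hcount : min 6 (m + 1) - d = (min 6 (m + 1) - (d + 1)) + 1 := by omega
            rw [hcount, List.range'_succ, List.flatMap_cons]
          · have hng : ¬ ((d : Int) + 1 ≤ 6 ∧ sp + ((d : Int) + 1) ≤ ep) := by
              intro ⟨_, h2⟩; exact hle h2
            rw [if_neg hng]
            have : min 6 (m + 1) - d = 0 := by omega
            simp [this]
      rw [key 6 0 rfl, G]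
      simp [List.range_eq_range']

theorem getD_map_range_G (n k : Nat) (h : k < n) :
    ((List.range n).map G).getD k [] = G k := by
  rw [List.getD_eq_getElem?_getD, List.getElem?_map, List.getElem?_range h]
  rfl

-- one fold step of B appends exactly the next row G (j+1)
theorem B_step (j : Nat)
    (dp : List (List String)) (hdp : dp = (List.range (j + 1)).map G) :
    (PySem.List.pyRange 1 (min 6 ((j : Int) + 1) + 1) 1).flatMap
      (fun d => (PySem.List.pyGetD dp ((j : Int) + 1 - d) []).map
        (fun s => PySem.Int.toStr d ++ s)) = G (j + 1) := by
  have hmin : min 6 ((j : Int) + 1) = ((min 6 (j + 1) : Nat) : Int) := by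
    push_cast; rfl
  rw [hmin, G, PySem.List.pyRange_one]
  have hlen : (((min 6 (j + 1) : Nat) : Int) + 1 - 1).toNat = min 6 (j + 1) := by omega
  rw [hlen, List.flatMap_map, List.flatMap_def, List.flatMap_def]
  congr 1
  apply List.map_congr_left
  intro i hi
  have him : i < min 6 (j + 1) := List.mem_range.mp hi
  have h2 : (1 : Int) + (i : Int) = (i : Int) + 1 := by omega
  have h1 : (j : Int) + 1 - ((i : Int) + 1) = ((j - i : Nat) : Int) := by omega
  rw [h2, h1, hdp, PySem.List.pyGetD_natCast, getD_map_range_G _ _ (by omega)]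

-- B's dp fold builds [G 0, …, G j]
theorem B_dp (sp ep : Int) (j : Nat) (hj : (j : Int) ≤ ep - sp) :
    (PySem.List.pyRange 1 ((j : Int) + 1) 1).foldl
      (fun dp k =>
        dp ++ [(PySem.List.pyRange 1 (min 6 k + 1) 1).flatMap
          (fun d => (PySem.List.pyGetD dp (k - d) []).map
            (fun s => PySem.Int.toStr d ++ s))])
      [[""]] = (List.range (j + 1)).map G := by
  induction j with
  | zero => simp [PySem.List.pyRange_one_eq_nil, G]
  | succ j ih =>
    have hsplit : PySem.List.pyRange 1 ((j : Int) + 1 + 1) 1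
        = PySem.List.pyRange 1 ((j : Int) + 1) 1 ++ [(j : Int) + 1] := by
      have := PySem.List.pyRange_one_succ_right (a := 1) (b := (j : Int) + 1) (by omega)
      simpa using this
    rw [show ((j + 1 : Nat) : Int) = (j : Int) + 1 from by push_cast; rfl] at *
    rw [hsplit, List.foldl_append, ih (by omega), List.foldl_cons, List.foldl_nil]
    rw [B_step j _ rfl]
    simp [List.range_succ]

theorem whileNil (sp ep : Int) (d : Nat) (h : ep < sp) : boardPathWhile sp ep d = [] := by
  rw [boardPathWhile, if_neg]
  intro ⟨_, h2⟩; omega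

theorem boardPath_spec : Claim_equal_boardPath := by
  intro sp ep _ _
  unfold Spec_boardPath boardPath_alt
  by_cases hlt : ep < sp
  · rw [if_pos hlt, boardPath, if_neg (by omega), whileNil sp ep 0 hlt]
  · rw [if_neg hlt]
    have hn : ep - sp = ((ep - sp).toNat : Int) := by omega
    rw [A_eq_G (ep - sp).toNat sp ep hn, hn, B_dp sp ep (ep - sp).toNat (by omega),
        PySem.List.pyGetD_natCast, getD_map_range_G _ _ (by omega)]
    congr 1
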